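-- pv_equiv track=rewrite | github.com/clinicalml/omop-learn | Utils/ancestor_utils.py | print_ancestors_of
-- ===== SOURCE A (Python) =====
-- def print_ancestors_of(feat, anc_name_dict, depth, printed_path):
--     '''
--     feat is a string
--     anc_name_dict maps feature names to ancestors
--     depth is number of tabs that precede feat
--     printed_path is a set of feature names that have already been on the path
--     prints this feature starting at indentation depth and all its ancestors that are not in printed_path (to avoid cycles)
--     '''
--     output_str = ''
--     for i in range(depth):
--         output_str += '\t'
--     output_str += '-> ' + feat + '\n'
--     if feat in printed_path:
--         return output_str
--     printed_path.add(feat)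
--     if feat in anc_name_dict:
--         for anc in anc_name_dict[feat]:
--             output_str += print_ancestors_of(anc, anc_name_dict, depth + 1, printed_path)
--     return output_str
-- ===== SOURCE B (Python) =====
-- def print_ancestors_of(feat, anc_name_dict, depth, printed_path):
--     # Iterative pre-order traversal with an explicit stack of (feature, depth)
--     # pairs instead of recursion; same return value and same printed_path
--     # mutation (same add order) as the recursive original.
--     output = []
--     stack = [(feat, depth)]
--     while stack:
--         f, d = stack.pop()
--         output.append('\t' * d + '-> ' + f + '\n')
--         if f in printed_path:
--             continue
--         printed_path.add(f)
--         if f in anc_name_dict: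
--             for anc in reversed(anc_name_dict[f]):
--                 stack.append((anc, d + 1))
--     return ''.join(output)
-- ===== Notes on version B (the rewrite author's own statement) =====
-- stated objective: alternative
-- what changed: Replaced the recursive DFS (one call per feature, string concatenation up the call chain) by an iterative pre-order traversal with an explicit stack of (feature, depth) pairs, pushing children in reversed order and joining collected line pieces at the end.
import Mathlib
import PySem

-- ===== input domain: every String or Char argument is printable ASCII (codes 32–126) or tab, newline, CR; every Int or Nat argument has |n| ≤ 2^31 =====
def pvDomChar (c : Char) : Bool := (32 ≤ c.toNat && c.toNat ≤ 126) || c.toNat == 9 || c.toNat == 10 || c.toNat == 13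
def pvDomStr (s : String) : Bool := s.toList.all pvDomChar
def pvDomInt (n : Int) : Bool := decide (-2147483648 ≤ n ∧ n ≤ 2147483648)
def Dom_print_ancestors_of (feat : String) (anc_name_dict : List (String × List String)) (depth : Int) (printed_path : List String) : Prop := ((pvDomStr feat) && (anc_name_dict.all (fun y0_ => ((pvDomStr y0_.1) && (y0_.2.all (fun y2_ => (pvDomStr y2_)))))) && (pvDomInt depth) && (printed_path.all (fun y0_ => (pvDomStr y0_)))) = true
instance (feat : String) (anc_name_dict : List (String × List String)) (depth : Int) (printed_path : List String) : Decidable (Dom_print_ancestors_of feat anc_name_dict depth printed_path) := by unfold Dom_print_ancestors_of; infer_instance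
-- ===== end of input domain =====

-- B replaces A's recursion by an iterative pre-order traversal with an explicit stack of
-- (feature, depth) pairs (objective: alternative decomposition, same cost). Both A and B
-- mutate printed_path in place identically (same add order); the equivalence proved here
-- is about the RETURN value (the set argument is threaded functionally in both ports).

-- ===== PORT A =====
-- termination measure: number of dict keys not yet in printed_path (used by both ports)
def pvMeas (d : List (String × List String)) (p : List String) : Nat :=
  ((d.map Prod.fst).toFinset \ p.toFinset).card

theorem pvMeas_le (d : List (String × List String)) {p q : List String}
    (h : ∀ x, x ∈ p → x ∈ q) : pvMeas d q ≤ pvMeas d p := by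
  apply Finset.card_le_card
  apply Finset.sdiff_subset_sdiff (Finset.Subset.refl _)
  intro x hx
  simp only [List.mem_toFinset] at *
  exact h x hx

theorem pvMeas_lt (d : List (String × List String)) {p : List String} {feat : String}
    (hk : feat ∈ d.map Prod.fst) (hp : feat ∉ p) :
    pvMeas d (PySem.Set.add p feat) < pvMeas d p := by
  apply Finset.card_lt_card
  constructor
  · apply Finset.sdiff_subset_sdiff (Finset.Subset.refl _)
    intro x hx
    simp only [List.mem_toFinset, PySem.Set.mem_add] at *
    exact Or.inl hx
  · intro hsub
    have h1 : feat ∈ (d.map Prod.fst).toFinset \ p.toFinset := by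
      simp [List.mem_toFinset, hk, hp]
    have h2 := hsub h1
    simp [List.mem_toFinset, PySem.Set.mem_add] at h2

theorem pvKey_of_get? {d : List (String × List String)} {feat : String} {v : List String}
    (h : (PySem.Dict.mk d).get? feat = some v) : feat ∈ d.map Prod.fst := by
  induction d with
  | nil => simp [PySem.Dict.get?] at h
  | cons hd tl ih =>
    rw [PySem.Dict.get?_mk_cons] at h
    by_cases he : hd.1 == feat
    · simp only [List.map_cons, List.mem_cons]
      exact Or.inl (eq_of_beq he).symm
    · simp only [he, Bool.false_eq_true, if_false] at h
      exact List.mem_cons_of_mem _ (ih h)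

mutual
-- literal port of A: output_str built by the tab loop then '-> '+feat+'\n'; recursion over
-- ancestors threads printed_path; the returned set carries its ⊆-proof only for termination
def pvARec (d : List (String × List String)) (feat : String) (depth : Int) (p : List String) :
    List Char × {q : List String // ∀ x, x ∈ p → x ∈ q} :=
  let head := (PySem.List.pyRange 0 depth 1).foldl (fun s _ => s ++ ['\t']) []
      ++ (('-' :: '>' :: ' ' :: feat.toList) ++ ['\n'])
  if hmem : PySem.Set.contains p feat = true then (head, ⟨p, fun _ h => h⟩)
  else
    match hq : (PySem.Dict.mk d).get? feat with
    | none => (head, ⟨PySem.Set.add p feat, fun x hx => (PySem.Set.mem_add _ _ _).2 (Or.inl hx)⟩)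
    | some ancs =>
      let r := pvGo d ancs (depth + 1) (PySem.Set.add p feat) head
      (r.1, ⟨r.2.1, fun x hx => r.2.2 x ((PySem.Set.mem_add _ _ _).2 (Or.inl hx))⟩)
  termination_by (pvMeas d p, 0, 0)
  decreasing_by
    have hnp : feat ∉ p := fun hc => hmem ((PySem.Set.contains_iff _ _).2 hc)
    exact Prod.Lex.left _ _ (pvMeas_lt d (pvKey_of_get? hq) hnp)

def pvGo (d : List (String × List String)) (ancs : List String) (depth : Int)
    (p : List String) (acc : List Char) :
    List Char × {q : List String // ∀ x, x ∈ p → x ∈ q} :=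
  match ancs with
  | [] => (acc, ⟨p, fun _ h => h⟩)
  | a :: rest =>
    let r := pvARec d a depth p
    let r2 := pvGo d rest depth r.2.1 (acc ++ r.1)
    (r2.1, ⟨r2.2.1, fun x hx => r2.2.2 x (r.2.2 x hx)⟩)
  termination_by (pvMeas d p, 1, ancs.length)
  decreasing_by
    · exact Prod.Lex.right _ (Prod.Lex.left _ _ Nat.zero_lt_one)
    · rcases lt_or_eq_of_le (pvMeas_le d r.2.2) with h | h
      · exact Prod.Lex.left _ _ h
      · rw [h]; exact Prod.Lex.right _ (Prod.Lex.right _ (Nat.lt_succ_self _))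
end

def print_ancestors_of (feat : String) (anc_name_dict : List (String × List String)) (depth : Int) (printed_path : List String) : String :=
  String.ofList (pvARec anc_name_dict feat depth printed_path).1

-- ===== PORT B =====
-- iterative port of Source B: Lean list head = Python stack top (end of the Python list), so
-- Python's stack.extend(reversed(children)) is prepending the children in original order
def pvBLoop (d : List (String × List String)) (stack : List (String × Int))
    (p : List String) (acc : List Char) : List Char :=
  match stack with
  | [] => acc
  | (f, dep) :: rest =>
    let acc' := acc ++ (List.replicate dep.toNat '\t' ++ ('-' :: '>' :: ' ' :: f.toList) ++ ['\n'])
    if hmem : PySem.Set.contains p f = true then pvBLoop d rest p acc'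
    else
      match hq : (PySem.Dict.mk d).get? f with
      | none => pvBLoop d rest (PySem.Set.add p f) acc'
      | some ancs =>
        pvBLoop d (ancs.map (fun a => (a, dep + 1)) ++ rest) (PySem.Set.add p f) acc'
  termination_by (pvMeas d p, stack.length)
  decreasing_by
    · exact Prod.Lex.right _ (Nat.lt_succ_self _)
    · rcases lt_or_eq_of_le (pvMeas_le d (fun x hx => (PySem.Set.mem_add _ _ _).2 (Or.inl hx))) with h | h
      · exact Prod.Lex.left _ _ h
      · rw [h]; exact Prod.Lex.right _ (Nat.lt_succ_self _)
    · have hnp : f ∉ p := fun hc => hmem ((PySem.Set.contains_iff _ _).2 hc)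
      exact Prod.Lex.left _ _ (pvMeas_lt d (pvKey_of_get? hq) hnp)

def print_ancestors_of_alt (feat : String) (anc_name_dict : List (String × List String)) (depth : Int) (printed_path : List String) : String :=
  String.ofList (pvBLoop anc_name_dict [(feat, depth)] printed_path [])

-- ===== PRECONDITION & SPEC =====
def Spec_print_ancestors_of (feat : String) (anc_name_dict : List (String × List String)) (depth : Int) (printed_path : List String) (out : String) : Prop := out = print_ancestors_of_alt feat anc_name_dict depth printed_path
instance (feat : String) (anc_name_dict : List (String × List String)) (depth : Int) (printed_path : List String) (out : String) : Decidable (Spec_print_ancestors_of feat anc_name_dict depth printed_path out) := by unfold Spec_print_ancestors_of; infer_instance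

-- ===== CLAIM (what is proved, stated in full; the proofs are below) =====
def Claim_equal_print_ancestors_of : Prop := ∀ (feat : String) (anc_name_dict : List (String × List String)) (depth : Int) (printed_path : List String), Dom_print_ancestors_of feat anc_name_dict depth printed_path → Spec_print_ancestors_of feat anc_name_dict depth printed_path (print_ancestors_of feat anc_name_dict depth printed_path)

-- ===== LEMMAS AND PROOFS =====

-- A's tab loop produces the same characters as B's replicate
theorem pvTabs_eq (depth : Int) (s : List Char) :
    (PySem.List.pyRange 0 depth 1).foldl (fun s _ => s ++ ['\t']) s
      = s ++ List.replicate depth.toNat '\t' := by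
  rw [PySem.List.foldl_append_singleton_eq_map]
  congr 1
  rw [List.map_const', PySem.List.length_pyRange_one]
  simp

-- pvGo's accumulator is a pure prefix of its result
theorem pvGo_acc (d : List (String × List String)) (ancs : List String) (depth : Int) :
    ∀ (p : List String) (x y : List Char),
      (pvGo d ancs depth p (x ++ y)).1 = x ++ (pvGo d ancs depth p y).1
      ∧ (pvGo d ancs depth p (x ++ y)).2.1 = (pvGo d ancs depth p y).2.1 := by
  induction ancs with
  | nil => intro p x y; rw [pvGo, pvGo]; exact ⟨rfl, rfl⟩
  | cons a rest ih =>
    intro p x y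
    rw [pvGo, pvGo]
    simp only
    have h1 := ih (pvARec d a depth p).2.1 x (y ++ (pvARec d a depth p).1)
    rw [List.append_assoc]
    exact h1

mutual
-- one popped stack entry of B computes exactly one recursive call of A
theorem pvStep (d : List (String × List String)) (feat : String) (depth : Int)
    (p : List String) (stack : List (String × Int)) (acc : List Char) :
    pvBLoop d ((feat, depth) :: stack) p acc
      = pvBLoop d stack (pvARec d feat depth p).2.1 (acc ++ (pvARec d feat depth p).1) := by
  rw [pvARec, pvBLoop]
  simp only [pvTabs_eq depth ([] : List Char), List.nil_append]
  by_cases hmem : PySem.Set.contains p feat = true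
  · simp only [hmem, dif_pos, List.append_assoc]
  · simp only [hmem, dif_neg, Bool.false_eq_true, not_false_iff]
    cases hq : (PySem.Dict.mk d).get? feat with
    | none => simp only [List.append_assoc]
    | some ancs =>
      simp only
      have hrec := pvSteps d ancs (depth + 1) (PySem.Set.add p feat) stack
        (acc ++ (List.replicate depth.toNat '\t' ++ ('-' :: '>' :: ' ' :: feat.toList) ++ ['\n']))
      have hpre := pvGo_acc d ancs (depth + 1) (PySem.Set.add p feat) acc
        (List.replicate depth.toNat '\t' ++ ('-' :: '>' :: ' ' :: feat.toList) ++ ['\n'])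
      simp only [List.append_assoc] at hrec hpre ⊢
      rw [hrec, hpre.1, hpre.2]
  termination_by (pvMeas d p, 0, 0)
  decreasing_by
    have hnp : feat ∉ p := fun hc => hmem ((PySem.Set.contains_iff _ _).2 hc)
    exact Prod.Lex.left _ _ (pvMeas_lt d (pvKey_of_get? hq) hnp)

-- a block of pushed children of B computes exactly A's loop over the ancestors
theorem pvSteps (d : List (String × List String)) (ancs : List String) (depth : Int)
    (p : List String) (stack : List (String × Int)) (acc : List Char) :
    pvBLoop d (ancs.map (fun a => (a, depth)) ++ stack) p acc
      = pvBLoop d stack (pvGo d ancs depth p acc).2.1 (pvGo d ancs depth p acc).1 := by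
  cases ancs with
  | nil => rw [pvGo]; simp only [List.map_nil, List.nil_append]
  | cons a rest =>
    rw [pvGo]
    simp only [List.map_cons, List.cons_append]
    rw [pvStep d a depth p (rest.map (fun a => (a, depth)) ++ stack) acc]
    exact pvSteps d rest depth (pvARec d a depth p).2.1 stack (acc ++ (pvARec d a depth p).1)
  termination_by (pvMeas d p, 1, ancs.length)
  decreasing_by
    · exact Prod.Lex.right _ (Prod.Lex.left _ _ Nat.zero_lt_one)
    · rcases lt_or_eq_of_le (pvMeas_le d (pvARec d a depth p).2.2) with h | h
      · exact Prod.Lex.left _ _ h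
      · rw [h]; exact Prod.Lex.right _ (Prod.Lex.right _ (Nat.lt_succ_self _))
end

-- ===== VERDICT (by name: the statement is the Claim_ definition above) =====
theorem print_ancestors_of_spec : Claim_equal_print_ancestors_of := by
  intro feat d depth p _
  unfold Spec_print_ancestors_of print_ancestors_of print_ancestors_of_alt
  rw [show ([(feat, depth)] : List (String × Int)) = (feat, depth) :: [] from rfl, pvStep, pvBLoop]
  simp
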